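-- pv_equiv track=rewrite | github.com/lcbb/ssDNA-memory | dnaMemFuncs.py | Int2DNA
-- ===== SOURCE A (Python) =====
-- def Int2DNA(numB):
-- 	convert = {'0': 'T', '1': 'G', '2': 'A', '3': 'C'}
-- 	newNum=''
-- 	current=numB
-- 	A=''
-- 	while int(current)!=0:
-- 		newNum=str(int(current%4))+newNum
-- 		current=int(current/4)
-- 	for i in newNum:
-- 		A=A+convert[i]
-- 	return(A);
-- ===== SOURCE B (Python) =====
-- def Int2DNA(numB):
--     convert = {0: 'T', 1: 'G', 2: 'A', 3: 'C'}
--     if int(numB) == 0: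
--         return ''
--     return Int2DNA(int(numB / 4)) + convert[int(numB % 4)]
-- ===== Notes on version B (the rewrite author's own statement) =====
-- stated objective: simpler
-- what changed: Replaced the two-pass loop (build a decimal digit string, then map each digit character through a dict) by a single recursive descent that emits the DNA letter for each base-4 digit directly, with no intermediate digit string.
import Mathlib
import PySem

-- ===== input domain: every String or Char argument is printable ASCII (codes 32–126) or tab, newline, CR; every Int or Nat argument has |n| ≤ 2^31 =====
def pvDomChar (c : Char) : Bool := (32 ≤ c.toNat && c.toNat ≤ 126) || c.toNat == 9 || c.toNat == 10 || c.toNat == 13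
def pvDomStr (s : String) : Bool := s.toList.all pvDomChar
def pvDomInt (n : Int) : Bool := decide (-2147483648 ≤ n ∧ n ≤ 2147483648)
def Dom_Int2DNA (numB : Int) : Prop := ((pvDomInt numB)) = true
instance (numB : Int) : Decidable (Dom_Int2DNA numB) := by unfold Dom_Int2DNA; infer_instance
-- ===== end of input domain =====

-- B replaces A's two passes (build a digit string, then map it through a dict) by one
-- recursive descent that emits each DNA letter directly (objective: simpler).
-- Strings are carried as List Char (the PySem.Chars representation) and wrapped with
-- String.ofList only at the return; Python's one-character strings ('T', the digit keys)
-- are represented by their Char.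

-- termination helper for both ports (cited in decreasing_by)
theorem pvTdiv4_natAbs_lt (n : Int) (h : n ≠ 0) : (n.tdiv 4).natAbs < n.natAbs := by
  rw [Int.natAbs_tdiv]
  exact Nat.div_lt_self (by omega) (by omega)

-- ===== PORT A =====
-- convert = {'0': 'T', '1': 'G', '2': 'A', '3': 'C'}
def pvConvertA : PySem.Dict Char Char := PySem.Dict.ofList [('0', 'T'), ('1', 'G'), ('2', 'A'), ('3', 'C')]

-- the while loop: newNum = str(int(current%4)) + newNum; current = int(current/4)
-- int(current/4) is Python true division truncated toward zero = Int.tdiv (exact on the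
-- domain |numB| ≤ 2^31, where the float quotient truncates to the exact truncating quotient);
-- current % 4 = PySem.Int.mod current 4; str(...) = PySem.Int.toChars.
def Int2DNA_loop (current : Int) (newNum : List Char) : List Char :=
  if _h : current ≠ 0 then
    Int2DNA_loop (current.tdiv 4) (PySem.Int.toChars (PySem.Int.mod current 4) ++ newNum)
  else newNum
termination_by current.natAbs
decreasing_by exact pvTdiv4_natAbs_lt current _h

def Int2DNA (numB : Int) : String :=
  -- for i in newNum: A = A + convert[i]  (every digit is '0'..'3', so convert[i] never raises
  -- KeyError; getD with an unreachable default ports the successful lookup exactly)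
  String.ofList ((Int2DNA_loop numB []).foldl (fun A i => A ++ [pvConvertA.getD i ' ']) [])

-- ===== PORT B =====
-- convert = {0: 'T', 1: 'G', 2: 'A', 3: 'C'}
def pvConvertB : PySem.Dict Int Char := PySem.Dict.ofList [(0, 'T'), (1, 'G'), (2, 'A'), (3, 'C')]

-- convert[int(numB % 4)] is always a hit (0 ≤ numB % 4 < 4), ported with an unreachable default
def Int2DNA_altChars (numB : Int) : List Char :=
  if _h : numB = 0 then []
  else Int2DNA_altChars (numB.tdiv 4) ++ [pvConvertB.getD (PySem.Int.mod numB 4) ' ']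
termination_by numB.natAbs
decreasing_by exact pvTdiv4_natAbs_lt numB (by omega)

def Int2DNA_alt (numB : Int) : String := String.ofList (Int2DNA_altChars numB)

-- ===== PRECONDITION & SPEC =====
def Spec_Int2DNA (numB : Int) (out : String) : Prop := out = Int2DNA_alt numB
instance (numB : Int) (out : String) : Decidable (Spec_Int2DNA numB out) := by unfold Spec_Int2DNA; infer_instance

-- ===== CLAIM (what is proved, stated in full; the proofs are below) =====
def Claim_equal_Int2DNA : Prop := ∀ (numB : Int), Dom_Int2DNA numB → Spec_Int2DNA numB (Int2DNA numB)

-- ===== LEMMAS AND PROOFS =====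

theorem pvMod4_cases (n : Int) :
    PySem.Int.mod n 4 = 0 ∨ PySem.Int.mod n 4 = 1 ∨ PySem.Int.mod n 4 = 2 ∨ PySem.Int.mod n 4 = 3 := by
  rw [PySem.Int.mod_eq_emod_of_pos (by omega)]
  have h₁ : 0 ≤ n % 4 := Int.emod_nonneg n (by omega)
  have h₂ : n % 4 < 4 := Int.emod_lt_of_pos n (by omega)
  omega

-- one base-4 digit: A's map of str(d) through the char-keyed dict equals B's int-keyed lookup of d
theorem pvDigit_eq (n : Int) :
    (PySem.Int.toChars (PySem.Int.mod n 4)).map (fun i => pvConvertA.getD i ' ')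
      = [pvConvertB.getD (PySem.Int.mod n 4) ' '] := by
  rcases pvMod4_cases n with h | h | h | h <;> rw [h] <;> decide

-- main invariant: mapping convert over the loop's digits yields B's letters followed by the
-- converted accumulator
theorem pvLoop_conv : ∀ (k : Nat) (current : Int), current.natAbs = k →
    ∀ acc : List Char, (Int2DNA_loop current acc).map (fun i => pvConvertA.getD i ' ')
      = Int2DNA_altChars current ++ acc.map (fun i => pvConvertA.getD i ' ') := by
  intro k
  induction k using Nat.strong_induction_on with
  | _ k ih =>
    intro current hk acc
    by_cases h : current = 0
    · rw [Int2DNA_loop, Int2DNA_altChars]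
      simp [h]
    · rw [Int2DNA_loop, Int2DNA_altChars]
      simp only [h, dif_neg, dif_pos, ne_eq, not_false_eq_true]
      rw [ih _ (hk ▸ pvTdiv4_natAbs_lt current h) _ rfl]
      rw [List.map_append, pvDigit_eq, List.append_assoc]

-- ===== VERDICT (by name: the statement is the Claim_ definition above) =====
theorem Int2DNA_spec : Claim_equal_Int2DNA := by
  intro numB _
  show Int2DNA numB = Int2DNA_alt numB
  unfold Int2DNA Int2DNA_alt
  rw [PySem.List.foldl_append_singleton_eq_map]
  rw [pvLoop_conv numB.natAbs numB rfl []]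
  simp
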